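-- pv_equiv track=rewrite | github.com/AaronRch27/algortimo_revision | scripts/principal_validar.py | tuplas_partes
-- ===== SOURCE A (Python) =====
-- def tuplas_partes(x,y,lista):
--     "Recibe listas: filas, columnas y numeros de partes para hacer las tuplas, regresa lista de listas de tuplas"
--     a = tuplasnt(x, y)
--     res = []
--     for i in lista:
--         l = []
--         for tupla in a:
--             if tupla[0] == i:
--                 l.append(tupla)
--         l.sort()
--         res.append(l)
--
--     return res
--
-- def tuplasnt(x,y):
--     """
--
--
--     Parameters
--     ----------
--     x : (list). Lista filas
--     y : (list). Lista columnas
--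
--     Returns
--     -------
--     tuplas : (list). Lista de tuplas con coordenada sa partir de X y Y
--
--     """
--     tuplas=[]
--     ind=0
--     for i in x:
--         a = (i,y[ind])
--         tuplas.append(a)
--         ind+=1
--     return tuplas
-- ===== SOURCE B (Python) =====
-- def tuplas_partes(x, y, lista):
--     "Recibe listas: filas, columnas y numeros de partes para hacer las tuplas, regresa lista de listas de tuplas"
--     groups = {}
--     ind = 0
--     for i in x:
--         t = (i, y[ind])
--         groups.setdefault(i, []).append(t)
--         ind += 1
--     return [sorted(groups.get(i, [])) for i in lista]
-- ===== Notes on version B (the rewrite author's own statement) =====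
-- stated objective: alternative
-- what changed: B partitions the tuples into a dict keyed by first component in one pass over x and then answers each part in lista by a direct lookup plus sort, instead of re-scanning the whole tuple list for every element of lista.
import Mathlib
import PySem

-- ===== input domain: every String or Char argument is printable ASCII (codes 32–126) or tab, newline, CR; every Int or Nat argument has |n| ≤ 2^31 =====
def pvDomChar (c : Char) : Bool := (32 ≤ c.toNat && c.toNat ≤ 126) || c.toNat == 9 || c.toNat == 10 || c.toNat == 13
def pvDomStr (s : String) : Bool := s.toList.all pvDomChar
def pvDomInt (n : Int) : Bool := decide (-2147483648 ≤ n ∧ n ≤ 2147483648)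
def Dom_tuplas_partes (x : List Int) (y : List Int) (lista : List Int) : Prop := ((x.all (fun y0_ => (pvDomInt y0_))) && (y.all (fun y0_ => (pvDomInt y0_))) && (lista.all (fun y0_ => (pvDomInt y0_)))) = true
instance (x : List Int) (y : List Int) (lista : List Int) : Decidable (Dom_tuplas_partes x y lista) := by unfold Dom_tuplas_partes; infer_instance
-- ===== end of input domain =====

-- B replaces A's rescan of the whole tuple list for every element of lista by one dict-partition
-- pass over x followed by direct lookups (objective: alternative; same return value on Pre_).

-- ===== PORT A =====
-- y[ind] is ported as pyGetD y ind 0; the default never fires on Pre_ (x.length ≤ y.length),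
-- since Python raises IndexError exactly there.
def tuplasnt (x : List Int) (y : List Int) : List (Int × Int) :=
  (x.foldl (fun (st : List (Int × Int) × Int) i =>
      (st.1 ++ [(i, PySem.List.pyGetD y st.2 0)], st.2 + 1)) ([], 0)).1

def tuplas_partes (x : List Int) (y : List Int) (lista : List Int) : List (List (Int × Int)) :=
  let a := tuplasnt x y
  lista.foldl (fun res i =>
    let l := a.foldl (fun l t => if t.1 == i then l ++ [t] else l) ([] : List (Int × Int))
    res ++ [PySem.List.sorted2 l (·.1) (·.2)]) []

-- ===== PORT B =====
-- groups.setdefault(i, []).append(t)  ≡  groups[i] = groups.get(i, []) + [t]  = Dict.modify i [] (· ++ [t])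
def tuplas_partes_alt (x : List Int) (y : List Int) (lista : List Int) : List (List (Int × Int)) :=
  let g := (x.foldl (fun (st : PySem.Dict Int (List (Int × Int)) × Int) i =>
      (st.1.modify i [] (fun l => l ++ [(i, PySem.List.pyGetD y st.2 0)]), st.2 + 1))
      (PySem.Dict.empty, 0)).1
  lista.map (fun i => PySem.List.sorted2 (g.getD i []) (·.1) (·.2))

-- ===== PRECONDITION & SPEC =====
-- Pre_ excludes exactly the inputs where Python's y[ind] raises IndexError (both A and B raise there).
def Pre_tuplas_partes (x : List Int) (y : List Int) (lista : List Int) : Prop := x.length ≤ y.length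
instance (x : List Int) (y : List Int) (lista : List Int) : Decidable (Pre_tuplas_partes x y lista) := by unfold Pre_tuplas_partes; infer_instance

def pvWitness_tuplas_partes : List Int × List Int × List Int := ([1, 2, 1], [4, 5, 6], [1, 3, 2])

def Spec_tuplas_partes (x : List Int) (y : List Int) (lista : List Int) (out : List (List (Int × Int))) : Prop := out = tuplas_partes_alt x y lista
instance (x : List Int) (y : List Int) (lista : List Int) (out : List (List (Int × Int))) : Decidable (Spec_tuplas_partes x y lista out) := by unfold Spec_tuplas_partes; infer_instance

-- ===== CLAIM (what is proved, stated in full; the proofs are below) =====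
def Claim_equal_tuplas_partes : Prop := ∀ (x : List Int) (y : List Int) (lista : List Int), Dom_tuplas_partes x y lista → Pre_tuplas_partes x y lista → Spec_tuplas_partes x y lista (tuplas_partes x y lista)

-- ===== LEMMAS AND PROOFS =====

-- The tuples (i, y[ind]) produced from x when the index counter starts at ind.
def pvPairs (y : List Int) : List Int → Int → List (Int × Int)
  | [], _ => []
  | i :: xs, ind => (i, PySem.List.pyGetD y ind 0) :: pvPairs y xs (ind + 1)

theorem pvFoldA (y : List Int) :
    ∀ (x : List Int) (acc : List (Int × Int)) (ind : Int),
      (x.foldl (fun (st : List (Int × Int) × Int) i =>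
        (st.1 ++ [(i, PySem.List.pyGetD y st.2 0)], st.2 + 1)) (acc, ind)).1
      = acc ++ pvPairs y x ind := by
  intro x
  induction x with
  | nil => intro acc ind; simp [pvPairs]
  | cons i xs ih => intro acc ind; simp [List.foldl, pvPairs, ih]

theorem pvFoldB (y : List Int) :
    ∀ (x : List Int) (d : PySem.Dict Int (List (Int × Int))) (ind : Int) (j : Int),
      ((x.foldl (fun (st : PySem.Dict Int (List (Int × Int)) × Int) i =>
        (st.1.modify i [] (fun l => l ++ [(i, PySem.List.pyGetD y st.2 0)]), st.2 + 1)) (d, ind)).1).getD j []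
      = d.getD j [] ++ (pvPairs y x ind).filter (fun t => t.1 == j) := by
  intro x
  induction x with
  | nil => intro d ind j; simp [pvPairs]
  | cons i xs ih =>
    intro d ind j
    simp only [List.foldl, pvPairs, List.filter]
    by_cases h : i = j
    · subst h
      rw [ih, PySem.Dict.getD_modify_self]
      simp
    · rw [ih, PySem.Dict.getD_modify_of_ne _ _ _ (Ne.symm h),
        beq_eq_false_iff_ne.mpr h]

-- ===== VERDICT (by name: the statement is the Claim_ definition above) =====
theorem tuplas_partes_spec : Claim_equal_tuplas_partes := by
  intro x y lista _ _
  unfold Spec_tuplas_partes tuplas_partes tuplas_partes_alt tuplasnt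
  rw [pvFoldA y x [] 0]
  simp only [List.nil_append]
  rw [PySem.List.foldl_append_singleton_eq_map]
  simp only [List.nil_append]
  apply List.map_congr_left
  intro i _
  rw [PySem.List.foldl_append_if_eq_filter, pvFoldB y x PySem.Dict.empty 0 i]
  simp [PySem.Dict.getD]
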